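-- pv_equiv track=rewrite | github.com/Asld97/CodeWars | Ex_23_80s_Kids.py | mark_spot
-- ===== SOURCE A (Python) =====
-- def mark_spot(n):
--
--     if isinstance(n, int) and n > 0 and n % 2 != 0:
--         string = ""
--         # Forward loop
--         for row in range(0, n, 2):
--             leading_spaces = row * " " + "X"
--             if row + 1 == n:
--                 trailing_spaces = "\n"
--             else:
--                 trailing_spaces = (2 * n - 3 - 2 * row) * " " + "X\n"
--             string += leading_spaces + trailing_spaces
--
--         # Backward loop
--         for row in range(n - 3, -1, -2):
--             leading_spaces = row * " " + "X"
--             trailing_spaces = (2 * n - 3 - 2 * row) * " " + "X\n"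
--
--             string += leading_spaces + trailing_spaces
--
--         return string
--     else:
--         return "?"
-- ===== SOURCE B (Python) =====
-- def mark_spot(n):
--     if isinstance(n, int) and n > 0 and n % 2 != 0:
--         lines = []
--         for i in range(n):
--             row = 2 * min(i, n - 1 - i)
--             if row == n - 1:
--                 lines.append(row * " " + "X")
--             else:
--                 lines.append(row * " " + "X" + (2 * n - 3 - 2 * row) * " " + "X")
--         return "\n".join(lines) + "\n"
--     else:
--         return "?"
-- ===== Notes on version B (the rewrite author's own statement) =====
-- stated objective: alternative
-- what changed: Replaces A's two sequential loops (forward top half, backward bottom half) with a single symmetric pass over all rows computing each row offset as twice the distance to the nearer edge, collecting bare lines and joining them with newlines instead of concatenating pre-terminated fragments.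
import Mathlib
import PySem

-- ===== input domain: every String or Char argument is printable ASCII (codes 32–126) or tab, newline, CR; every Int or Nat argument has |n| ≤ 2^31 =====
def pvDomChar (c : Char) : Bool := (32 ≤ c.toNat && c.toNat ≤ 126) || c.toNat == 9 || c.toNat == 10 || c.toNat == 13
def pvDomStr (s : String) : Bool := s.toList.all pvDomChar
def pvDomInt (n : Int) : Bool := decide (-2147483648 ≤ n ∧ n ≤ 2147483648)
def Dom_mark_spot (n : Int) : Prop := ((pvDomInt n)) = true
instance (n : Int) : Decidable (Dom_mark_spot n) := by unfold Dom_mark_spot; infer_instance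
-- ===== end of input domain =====

-- B replaces A's two sequential loops (forward then backward) with one symmetric pass over all rows,
-- computing each row offset as twice the distance to the nearer edge and joining bare lines with newlines (alternative decomposition, same cost).

-- ===== PORT A =====
def mark_spot (n : Int) : String :=
  if 0 < n ∧ PySem.Int.mod n 2 ≠ 0 then
    -- Forward loop
    let s1 : List Char := (PySem.List.pyRange 0 n 2).foldl (fun acc row =>
      let leading_spaces := PySem.List.pyRepeat [' '] row ++ ['X']
      let trailing_spaces := if row + 1 = n then ['\n']
        else PySem.List.pyRepeat [' '] (2 * n - 3 - 2 * row) ++ ['X', '\n']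
      acc ++ (leading_spaces ++ trailing_spaces)) []
    -- Backward loop
    let s2 : List Char := (PySem.List.pyRange (n - 3) (-1) (-2)).foldl (fun acc row =>
      let leading_spaces := PySem.List.pyRepeat [' '] row ++ ['X']
      let trailing_spaces := PySem.List.pyRepeat [' '] (2 * n - 3 - 2 * row) ++ ['X', '\n']
      acc ++ (leading_spaces ++ trailing_spaces)) s1
    String.mk s2
  else "?"

-- ===== PORT B =====
def mark_spot_alt (n : Int) : String :=
  if 0 < n ∧ PySem.Int.mod n 2 ≠ 0 then
    let lines : List (List Char) := (PySem.List.pyRange 0 n 1).foldl (fun ls i =>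
      let row := 2 * min i (n - 1 - i)
      if row = n - 1 then ls ++ [PySem.List.pyRepeat [' '] row ++ ['X']]
      else ls ++ [PySem.List.pyRepeat [' '] row ++ ['X'] ++
                  PySem.List.pyRepeat [' '] (2 * n - 3 - 2 * row) ++ ['X']]) []
    String.mk (PySem.Chars.join ['\n'] lines ++ ['\n'])
  else "?"

-- ===== PRECONDITION & SPEC =====
def Spec_mark_spot (n : Int) (out : String) : Prop := out = mark_spot_alt n
instance (n : Int) (out : String) : Decidable (Spec_mark_spot n out) := by unfold Spec_mark_spot; infer_instance

-- ===== CLAIM (what is proved, stated in full; the proofs are below) =====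
def Claim_equal_mark_spot : Prop := ∀ (n : Int), Dom_mark_spot n → Spec_mark_spot n (mark_spot n)

-- ===== LEMMAS AND PROOFS =====

-- a foldl that appends one element per step, chosen by a branch, collects the mapped list
theorem pv_foldl_if_append {α : Type} (p : α → Prop) [DecidablePred p] (f g : α → List Char)
    (l : List α) (acc : List (List Char)) :
    l.foldl (fun ls i => if p i then ls ++ [f i] else ls ++ [g i]) acc
      = acc ++ l.map (fun i => if p i then f i else g i) := by
  induction l generalizing acc with
  | nil => simp
  | cons x xs ih => simp only [List.foldl_cons, List.map_cons]; split_ifs <;> simp [ih]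

-- joining with '\n' and appending a final '\n' terminates every line
theorem pv_joinNl (ls : List (List Char)) (h : ls ≠ []) :
    PySem.Chars.join ['\n'] ls ++ ['\n'] = (ls.map (fun l => l ++ ['\n'])).flatten := by
  induction ls with
  | nil => simp at h
  | cons a t ih =>
    cases t with
    | nil => simp [PySem.Chars.join_singleton]
    | cons b t' =>
      rw [PySem.Chars.join_cons_cons]
      simp only [List.map_cons, List.flatten_cons] at ih ⊢
      rw [List.append_assoc, List.append_assoc, ih (by simp)]
      simp


-- ===== VERDICT (by name: the statement is the Claim_ definition above) =====
theorem mark_spot_spec : Claim_equal_mark_spot := by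
  intro n _
  unfold Spec_mark_spot mark_spot mark_spot_alt
  by_cases h : 0 < n ∧ PySem.Int.mod n 2 ≠ 0
  · rw [if_pos h, if_pos h]
    obtain ⟨k, hk⟩ : ∃ k : Nat, n = 2 * (k : Int) + 1 := by
      have h2 := h.2
      rw [PySem.Int.mod_eq_emod_of_pos (by norm_num : (0:Int) < 2)] at h2
      exact ⟨((n - 1) / 2).toNat, by omega⟩
    have hr1 : PySem.List.pyRange 0 n 2 = (List.range (k + 1)).map (fun j : Nat => 2 * (j : Int)) := by
      rw [PySem.List.pyRange_of_pos 0 n (by norm_num)]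
      rw [if_pos (by omega)]
      have hc : ((n - 0 + 2 - 1) / 2).toNat = k + 1 := by omega
      rw [hc]
      exact List.map_congr_left (fun j _ => by ring)
    have hr2 : PySem.List.pyRange (n - 3) (-1) (-2)
        = (List.range k).map (fun j : Nat => n - 3 - 2 * (j : Int)) := by
      simp only [PySem.List.pyRange]
      rw [if_neg (by norm_num)]
      by_cases hk0 : k = 0
      · subst hk0; rw [if_neg (by omega), if_neg (by omega)]; simp
      · rw [if_neg (by norm_num), if_pos (by omega)]
        have hc : ((n - 3 - -1 + - -2 - 1) / -(-2)).toNat = k := by simp only [neg_neg]; omega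
        rw [hc]
        exact List.map_congr_left (fun j _ => by ring)
    have hr3 : PySem.List.pyRange 0 n 1 = (List.range (2 * k + 1)).map (fun j : Nat => (j : Int)) := by
      rw [PySem.List.pyRange_one]
      have hc : (n - 0).toNat = 2 * k + 1 := by omega
      rw [hc]
      exact List.map_congr_left (fun j _ => by ring)
    rw [hr1, hr2, hr3]
    dsimp only
    rw [PySem.List.foldl_append_eq_flatMap, PySem.List.foldl_append_eq_flatMap,
        pv_foldl_if_append (fun i => 2 * min i (n - 1 - i) = n - 1)
          (fun i => PySem.List.pyRepeat [' '] (2 * min i (n - 1 - i)) ++ ['X'])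
          (fun i => PySem.List.pyRepeat [' '] (2 * min i (n - 1 - i)) ++ ['X'] ++
            PySem.List.pyRepeat [' '] (2 * n - 3 - 2 * (2 * min i (n - 1 - i))) ++ ['X'])]
    rw [List.nil_append,
        pv_joinNl _ (by simp)]
    apply congrArg
    rw [List.flatMap_def, List.flatMap_def, ← List.flatten_append]
    apply congrArg
    rw [List.map_map, List.map_map, List.nil_append, List.map_map]
    apply List.ext_getElem (by simp; omega)
    intro i h1 h2
    rcases Nat.lt_or_ge i (k + 1) with hik | hik
    · rw [List.getElem_append_left (by simpa using hik)]
      simp only [List.getElem_map, List.getElem_range, Function.comp_apply]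
      have hmin : min ((i : Int)) (n - 1 - (i : Int)) = (i : Int) := min_eq_left (by omega)
      rw [hmin]
      by_cases hik2 : i = k
      · subst hik2
        rw [if_pos (by omega), if_pos (by omega)]
      · rw [if_neg (by omega), if_neg (by omega)]
        simp
    · rw [List.getElem_append_right (by simpa using hik)]
      simp only [List.getElem_map, List.getElem_range, List.length_map, List.length_range,
        Function.comp_apply]
      have hmin : min ((i : Int)) (n - 1 - (i : Int)) = n - 1 - (i : Int) :=
        min_eq_right (by simp at h2; omega)
      rw [hmin]
      rw [if_neg (by simp at h2; omega)]
      have ha : n - 3 - 2 * ((i - (k + 1) : Nat) : Int) = 2 * (n - 1 - (i : Int)) := by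
        simp at h2; omega
      rw [ha]
      simp
  · rw [if_neg h, if_neg h]
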